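-- pv_equiv track=rewrite | github.com/PigInTheSky1234/Automatic-Search-for-Neutral-Differences | 0. SearchForNDonSPECK32/NeuralDiffSearch.py | Bin2Mask
-- ===== SOURCE A (Python) =====
-- def Bin2Mask(BinNum, n):
--     d = 0
--     for i in range(n):
--         if BinNum[-1 - i]:
--             d += 1 << i
--     LenMask = int(n / 2)
--     dl = d >> LenMask
--     dr = d & (2 ** LenMask - 1)
--     return dl, dr
-- ===== SOURCE B (Python) =====
-- def Bin2Mask(BinNum, n):
--     LenMask = int(n / 2)
--     dr = 0
--     for i in range(LenMask):
--         if BinNum[-1 - i]: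
--             dr += 1 << i
--     dl = 0
--     for i in range(LenMask, n):
--         if BinNum[-1 - i]:
--             dl += 1 << (i - LenMask)
--     return dl, dr
-- ===== Notes on version B (the rewrite author's own statement) =====
-- stated objective: alternative
-- what changed: Instead of assembling the whole n-bit integer and then splitting it with a shift and a mask, B accumulates the right half and the left half directly in two separate partitioned loops and never forms the combined integer.
import Mathlib
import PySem

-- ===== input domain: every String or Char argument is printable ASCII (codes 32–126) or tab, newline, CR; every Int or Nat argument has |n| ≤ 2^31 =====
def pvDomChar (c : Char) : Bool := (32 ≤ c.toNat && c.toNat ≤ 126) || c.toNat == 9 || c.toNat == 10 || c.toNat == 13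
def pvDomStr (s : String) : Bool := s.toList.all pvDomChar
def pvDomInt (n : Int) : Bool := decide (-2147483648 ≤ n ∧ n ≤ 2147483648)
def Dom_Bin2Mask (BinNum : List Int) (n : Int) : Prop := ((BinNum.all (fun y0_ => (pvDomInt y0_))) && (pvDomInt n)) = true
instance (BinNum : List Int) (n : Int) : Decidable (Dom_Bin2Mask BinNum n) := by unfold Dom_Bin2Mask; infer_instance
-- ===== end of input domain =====

-- B accumulates the two half-masks directly in two partitioned loops instead of
-- building the full integer and splitting it with a shift and a mask (objective: alternative).


-- ===== PORT A =====
-- int(n/2) truncates toward zero = Int.tdiv (exact: |n| ≤ 2^31 so n/2 is an exact float);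
-- for LenMask ≥ 0 (guaranteed by Pre_), d >> LenMask = d.ediv 2^LenMask and
-- d & (2^LenMask - 1) = d.emod 2^LenMask — exact Python semantics of >> and & on ints.
def Bin2Mask (BinNum : List Int) (n : Int) : Int × Int :=
  let d := (PySem.List.pyRange 0 n 1).foldl
    (fun d i => if PySem.List.pyGetD BinNum (-1 - i) 0 ≠ 0 then d + 2 ^ i.toNat else d) 0
  let LenMask := Int.tdiv n 2
  let dl := d / 2 ^ LenMask.toNat
  let dr := d % 2 ^ LenMask.toNat
  (dl, dr)

-- ===== PORT B =====
def Bin2Mask_alt (BinNum : List Int) (n : Int) : Int × Int :=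
  let LenMask := Int.tdiv n 2
  let dr := (PySem.List.pyRange 0 LenMask 1).foldl
    (fun dr i => if PySem.List.pyGetD BinNum (-1 - i) 0 ≠ 0 then dr + 2 ^ i.toNat else dr) 0
  let dl := (PySem.List.pyRange LenMask n 1).foldl
    (fun dl i => if PySem.List.pyGetD BinNum (-1 - i) 0 ≠ 0 then dl + 2 ^ (i - LenMask).toNat else dl) 0
  (dl, dr)

-- ===== PRECONDITION & SPEC =====
-- A raises IndexError when n > len(BinNum) (BinNum[-1-i] out of range) and
-- ValueError ("negative shift count") when n ≤ -2 (LenMask = int(n/2) < 0); n = -1 is fine (LenMask = 0).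
def Pre_Bin2Mask (BinNum : List Int) (n : Int) : Prop := -1 ≤ n ∧ n ≤ BinNum.length
instance (BinNum : List Int) (n : Int) : Decidable (Pre_Bin2Mask BinNum n) := by unfold Pre_Bin2Mask; infer_instance
def pvWitness_Bin2Mask : List Int × Int := ([1, 0, 1, 1], 4)

def Spec_Bin2Mask (BinNum : List Int) (n : Int) (out : Int × Int) : Prop := out = Bin2Mask_alt BinNum n
instance (BinNum : List Int) (n : Int) (out : Int × Int) : Decidable (Spec_Bin2Mask BinNum n out) := by unfold Spec_Bin2Mask; infer_instance

-- ===== CLAIM (what is proved, stated in full; the proofs are below) =====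
def Claim_equal_Bin2Mask : Prop := ∀ (BinNum : List Int) (n : Int), Dom_Bin2Mask BinNum n → Pre_Bin2Mask BinNum n → Spec_Bin2Mask BinNum n (Bin2Mask BinNum n)

-- ===== LEMMAS AND PROOFS =====

-- the weight of bit i in the combined integer
def pvW (BinNum : List Int) (i : Int) : Int :=
  if PySem.List.pyGetD BinNum (-1 - i) 0 ≠ 0 then 2 ^ i.toNat else 0

theorem pvFold_eq_sum (BinNum : List Int) (g : Int → Int) (l : List Int) (c : Int) :
    l.foldl (fun d i => if PySem.List.pyGetD BinNum (-1 - i) 0 ≠ 0 then d + g i else d) c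
      = c + (l.map (fun i => if PySem.List.pyGetD BinNum (-1 - i) 0 ≠ 0 then g i else 0)).sum := by
  induction l generalizing c with
  | nil => simp
  | cons a l ih =>
    simp only [List.foldl_cons, List.map_cons, List.sum_cons, ih]
    split_ifs <;> ring

theorem pvSum_nonneg (BinNum : List Int) (g : Int → Int) (hg : ∀ i, 0 ≤ g i) (l : List Int) :
    0 ≤ (l.map (fun i => if PySem.List.pyGetD BinNum (-1 - i) 0 ≠ 0 then g i else 0)).sum := by
  apply List.sum_nonneg
  intro x hx
  obtain ⟨i, _, rfl⟩ := List.mem_map.1 hx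
  split_ifs
  · exact hg i
  · exact le_refl 0

theorem pvSum_bound (BinNum : List Int) (k : Nat) :
    ∀ (a b : Int), 0 ≤ a → a ≤ b → (b - a).toNat = k →
      ((PySem.List.pyRange a b 1).map (pvW BinNum)).sum ≤ 2 ^ b.toNat - 2 ^ a.toNat := by
  induction k with
  | zero =>
    intro a b ha hab hk
    have hba : b ≤ a := by omega
    rw [PySem.List.pyRange_one_eq_nil hba]
    have heq : b = a := by omega
    rw [heq]
    simp
  | succ k ih =>
    intro a b ha hab hk
    have hlt : a < b := by omega
    rw [PySem.List.pyRange_one_cons hlt]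
    simp only [List.map_cons, List.sum_cons]
    have h1 : ((PySem.List.pyRange (a + 1) b 1).map (pvW BinNum)).sum
        ≤ 2 ^ b.toNat - 2 ^ (a + 1).toNat := ih (a + 1) b (by omega) (by omega) (by omega)
    have h2 : pvW BinNum a ≤ 2 ^ a.toNat := by
      unfold pvW; split_ifs
      · exact le_refl _
      · positivity
    have h3 : (a + 1).toNat = a.toNat + 1 := by omega
    have h4 : (2 : Int) ^ (a.toNat + 1) = 2 ^ a.toNat + 2 ^ a.toNat := by ring
    rw [h3, h4] at h1
    omega

theorem pvShift_sum (BinNum : List Int) (k : Nat) :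
    ∀ (a b L : Int), 0 ≤ L → L ≤ a → (b - a).toNat = k →
      ((PySem.List.pyRange a b 1).map (pvW BinNum)).sum
        = 2 ^ L.toNat *
          ((PySem.List.pyRange a b 1).map (fun i =>
            if PySem.List.pyGetD BinNum (-1 - i) 0 ≠ 0 then (2 : Int) ^ (i - L).toNat else 0)).sum := by
  induction k with
  | zero =>
    intro a b L hL hLa hk
    have hba : b ≤ a := by omega
    simp [PySem.List.pyRange_one_eq_nil hba]
  | succ k ih =>
    intro a b L hL hLa hk
    have hlt : a < b := by omega
    rw [PySem.List.pyRange_one_cons hlt]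
    simp only [List.map_cons, List.sum_cons]
    rw [ih (a + 1) b L hL (by omega) (by omega)]
    have hsplit : a.toNat = L.toNat + (a - L).toNat := by omega
    have hw : pvW BinNum a
        = 2 ^ L.toNat * (if PySem.List.pyGetD BinNum (-1 - a) 0 ≠ 0 then (2 : Int) ^ (a - L).toNat else 0) := by
      unfold pvW
      split_ifs <;> simp [hsplit, pow_add]
    rw [hw]; ring

-- ===== VERDICT (by name: the statement is the Claim_ definition above) =====
theorem Bin2Mask_spec : Claim_equal_Bin2Mask := by
  intro BinNum n _ hpre
  obtain ⟨hn1, hn2⟩ := hpre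
  unfold Spec_Bin2Mask Bin2Mask Bin2Mask_alt
  by_cases hneg : n < 0
  · -- n = -1: every range is empty, both sides are (0, 0)
    have hn : n = -1 := by omega
    subst hn
    norm_num [show Int.tdiv (-1) 2 = 0 from by decide, PySem.List.pyRange_one_eq_nil]
  · have hn0 : 0 ≤ n := by omega
    have hLdef : Int.tdiv n 2 = n / 2 := Int.tdiv_eq_ediv_of_nonneg hn0
    simp only [pvFold_eq_sum, hLdef, zero_add]
    set L := n / 2 with hL
    have hL0 : 0 ≤ L := by omega
    have hLn : L ≤ n := by omega
    have hw : (fun i => if PySem.List.pyGetD BinNum (-1 - i) 0 ≠ 0 then (2:Int) ^ i.toNat else 0)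
        = pvW BinNum := rfl
    rw [hw, PySem.List.pyRange_one_append 0 L n hL0 hLn, List.map_append, List.sum_append,
        pvShift_sum BinNum (n - L).toNat L n L hL0 (le_refl L) rfl]
    set dr := ((PySem.List.pyRange 0 L 1).map (pvW BinNum)).sum with hdr
    set dl := ((PySem.List.pyRange L n 1).map (fun i =>
      if PySem.List.pyGetD BinNum (-1 - i) 0 ≠ 0 then (2:Int) ^ (i - L).toNat else 0)).sum with hdl
    have hMpos : (0:Int) < 2 ^ L.toNat := by positivity
    have hdr0 : 0 ≤ dr := by
      rw [hdr, show pvW BinNum = (fun i => if PySem.List.pyGetD BinNum (-1 - i) 0 ≠ 0 then (2:Int) ^ i.toNat else 0) from rfl]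
      exact pvSum_nonneg BinNum _ (fun i => by positivity) _
    have hdrM : dr < 2 ^ L.toNat := by
      have := pvSum_bound BinNum L.toNat 0 L (le_refl 0) hL0 (by omega)
      have h0 : ((0:Int)).toNat = 0 := rfl
      rw [h0, pow_zero] at this
      omega
    simp only [Prod.mk.injEq]
    constructor
    · -- dl component
      show (dr + 2 ^ L.toNat * dl) / 2 ^ L.toNat = dl
      rw [Int.add_mul_ediv_left dr dl (ne_of_gt hMpos),
          Int.ediv_eq_zero_of_lt hdr0 hdrM, zero_add]
    · -- dr component
      show (dr + 2 ^ L.toNat * dl) % 2 ^ L.toNat = dr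
      rw [Int.add_mul_emod_self_left, Int.emod_eq_of_lt hdr0 hdrM]
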